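-- pv_equiv track=rewrite | github.com/teuodor/univeristy | programming fundamentals/Backtracking/Problema62.py | bckt
-- ===== SOURCE A (Python) =====
-- def solutionFound(poz,list):
--     l = []
--     for i in poz:
--         l.append(list[i])
--     return l
--
-- def consistent(poz,list):
--     if len(poz) >= 2:
--         if list[poz[-1]] <= list[poz[-2]]:
--             return False
--
--     return True
--
-- def solution(poz,list,n):
--     suma = 0
--     for i in poz:
--         suma += list[i]
--
--     if suma%n == 0:
--         return True
--     return False
--
-- def bckt(list,n):
--     poz = []
--     sol = []
--     def rec(poz,list,n,sol):
--         poz.append(-1)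
--         for i in range(0,len(list)):
--             poz[-1] = i
--             if consistent(poz,list):
--                 if solution(poz, list, n):
--                     sol.append(solutionFound(poz, list))
--                 rec(poz[:], list, n, sol)
--
--         poz.pop()
--
--         return sol
--
--     return rec(poz,list,n,sol)
-- ===== SOURCE B (Python) =====
-- def bckt(list, n):
--     sol = []
--
--     def rec(path, lastval, runningsum):
--         for i in range(len(list)):
--             v = list[i]
--             if not path or v > lastval:
--                 newsum = runningsum + v
--                 if newsum % n == 0:
--                     sol.append(path + [v])
--                 rec(path + [v], v, newsum)
--
--     rec([], None, 0)
--     return sol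
-- ===== Notes on version B (the rewrite author's own statement) =====
-- stated objective: simpler
-- what changed: B replaces A's index-path state and the three helper passes that rescan it at every node (solutionFound rebuilds the value list, consistent re-indexes the last two positions, solution re-sums the whole path) by a single recursive DFS that threads the value path, the last value and the running sum as accumulators, so each node does O(1) work beyond emitting a result.
import Mathlib
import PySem

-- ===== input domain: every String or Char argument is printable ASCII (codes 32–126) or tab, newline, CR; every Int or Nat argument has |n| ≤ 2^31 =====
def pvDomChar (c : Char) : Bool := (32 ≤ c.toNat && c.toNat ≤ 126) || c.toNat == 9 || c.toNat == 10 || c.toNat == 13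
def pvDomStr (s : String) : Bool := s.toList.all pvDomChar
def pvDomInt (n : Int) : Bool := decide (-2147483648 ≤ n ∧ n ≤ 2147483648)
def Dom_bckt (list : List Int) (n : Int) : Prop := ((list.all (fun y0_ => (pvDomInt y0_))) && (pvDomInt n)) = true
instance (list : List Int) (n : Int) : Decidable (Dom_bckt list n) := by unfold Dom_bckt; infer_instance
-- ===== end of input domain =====

-- B threads the value path, last value and running sum through the DFS instead of storing an
-- index path and rescanning it with three helpers at every node (objective: simpler).
-- Both recursions are fueled with list.length + 1; a path's values strictly increase, so its
-- length never exceeds list.length and the fuel is never exhausted.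

-- ===== PORT A =====
-- list[i] for an index known to be in range (i always comes from range(len(list)) or poz)
def pyAt (l : List Int) (i : Int) : Int := (PySem.List.pyGet? l i).getD 0

def solutionFound (poz : List Int) (list : List Int) : List Int :=
  poz.foldl (fun acc i => acc ++ [pyAt list i]) []

def consistent (poz : List Int) (list : List Int) : Bool :=
  if 2 ≤ poz.length then
    if pyAt list (pyAt poz (-1)) ≤ pyAt list (pyAt poz (-2)) then false else true
  else true

def solution (poz : List Int) (list : List Int) (n : Int) : Bool :=
  let suma := poz.foldl (fun s i => s + pyAt list i) 0
  if PySem.Int.mod suma n == 0 then true else false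

def bcktRec (list : List Int) (n : Int) : Nat → List Int → List (List Int) → List (List Int)
  | 0, _, sol => sol
  | fuel + 1, poz, sol =>
    (PySem.List.pyRange 0 list.length 1).foldl
      (fun sol i =>
        let poz' := poz ++ [i]
        if consistent poz' list then
          let sol' := if solution poz' list n then sol ++ [solutionFound poz' list] else sol
          bcktRec list n fuel poz' sol'
        else sol) sol

def bckt (list : List Int) (n : Int) : List (List Int) :=
  bcktRec list n (list.length + 1) [] []

-- ===== PORT B =====
def bcktAltRec (list : List Int) (n : Int) :
    Nat → List Int → Option Int → Int → List (List Int) → List (List Int)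
  | 0, _, _, _, sol => sol
  | fuel + 1, path, lastval, runningsum, sol =>
    (PySem.List.pyRange 0 list.length 1).foldl
      (fun sol i =>
        let v := pyAt list i
        if (match lastval with | none => true | some lv => decide (lv < v)) then
          let newsum := runningsum + v
          let sol' := if PySem.Int.mod newsum n == 0 then sol ++ [path ++ [v]] else sol
          bcktAltRec list n fuel (path ++ [v]) (some v) newsum sol'
        else sol) sol

def bckt_alt (list : List Int) (n : Int) : List (List Int) :=
  bcktAltRec list n (list.length + 1) [] none 0 []

-- ===== PRECONDITION & SPEC =====
-- A raises ZeroDivisionError ('suma % n') as soon as the first search node is reached, i.e.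
-- whenever n = 0 and the list is nonempty; those inputs are excluded (B raises there too).
def Pre_bckt (list : List Int) (n : Int) : Prop := n ≠ 0 ∨ list = []
instance (list : List Int) (n : Int) : Decidable (Pre_bckt list n) := by
  unfold Pre_bckt; infer_instance

def pvWitness_bckt : List Int × Int := ([1, 2, 3], 2)

def Spec_bckt (list : List Int) (n : Int) (out : List (List Int)) : Prop := out = bckt_alt list n
instance (list : List Int) (n : Int) (out : List (List Int)) : Decidable (Spec_bckt list n out) := by
  unfold Spec_bckt; infer_instance

-- ===== CLAIM (what is proved, stated in full; the proofs are below) =====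
def Claim_equal_bckt : Prop :=
  ∀ (list : List Int) (n : Int), Dom_bckt list n → Pre_bckt list n → Spec_bckt list n (bckt list n)

-- ===== LEMMAS AND PROOFS =====

theorem foldl_ext {α β : Type} (f g : β → α → β) (h : ∀ s a, f s a = g s a) :
    ∀ (l : List α) (s : β), l.foldl f s = l.foldl g s := by
  intro l
  induction l with
  | nil => intro s; rfl
  | cons a l ih => intro s; simp only [List.foldl_cons, h]; exact ih _

theorem consistent_append (poz : List Int) (list : List Int) (i : Int) :
    consistent (poz ++ [i]) list =
      (match (poz.getLast?).map (pyAt list) with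
       | none => true
       | some lv => decide (lv < pyAt list i)) := by
  cases poz with
  | nil => simp [consistent]
  | cons a t =>
    have hlen : 2 ≤ ((a :: t) ++ [i]).length := by simp
    have h1 : pyAt ((a :: t) ++ [i]) (-1) = i := by
      rw [pyAt, PySem.List.pyGet?_neg_one_append_singleton]; rfl
    have h2 : pyAt ((a :: t) ++ [i]) (-2) = pyAt (a :: t) (-1) := by
      have hk : (2 : Nat) ≤ ((a :: t) ++ [i]).length := hlen
      rw [pyAt, show ((-2 : Int)) = -((2 : Nat) : Int) by norm_num,
        PySem.List.pyGet?_neg_natCast _ _ (by omega) hk]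
      rw [pyAt, PySem.List.pyGet?_neg_one]
      have : ((a :: t) ++ [i]).length - 2 = (a :: t).length - 1 := by simp
      rw [this]
      cases t with
      | nil => simp
      | cons b u =>
        have hget : ((a :: b :: u) ++ [i])[(a :: b :: u).length - 1]? =
            (a :: b :: u)[(a :: b :: u).length - 1]? := by
          rw [List.getElem?_append_left (by simp)]
        simp only [hget, List.getLast?_eq_getElem?]
    have hlast : (a :: t).getLast? = some (pyAt (a :: t) (-1)) := by
      rw [pyAt, PySem.List.pyGet?_neg_one]
      cases h : (a :: t).getLast? with
      | none => simp at h
      | some x => simp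
    rw [hlast]
    simp only [consistent, if_pos hlen, h1, h2, Option.map_some]
    by_cases hle : pyAt list i ≤ pyAt list (pyAt (a :: t) (-1))
    · simp [hle, not_lt_of_ge hle]
    · simp [hle, lt_of_not_ge hle]

theorem solutionFound_append (poz list : List Int) (i : Int) :
    solutionFound (poz ++ [i]) list = solutionFound poz list ++ [pyAt list i] := by
  simp [solutionFound, List.foldl_append]

theorem sum_append (poz list : List Int) (i : Int) :
    (poz ++ [i]).foldl (fun s j => s + pyAt list j) 0 =
      poz.foldl (fun s j => s + pyAt list j) 0 + pyAt list i := by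
  simp [List.foldl_append]

theorem solution_eq (poz list : List Int) (n : Int) :
    solution poz list n = (PySem.Int.mod (poz.foldl (fun s j => s + pyAt list j) 0) n == 0) := by
  simp only [solution]
  by_cases h : PySem.Int.mod (poz.foldl (fun s j => s + pyAt list j) 0) n = 0 <;> simp [h]

theorem rec_eq (list : List Int) (n : Int) :
    ∀ (fuel : Nat) (poz : List Int) (sol : List (List Int)),
      bcktRec list n fuel poz sol =
        bcktAltRec list n fuel (solutionFound poz list) ((poz.getLast?).map (pyAt list))
          (poz.foldl (fun s j => s + pyAt list j) 0) sol := by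
  intro fuel
  induction fuel with
  | zero => intro poz sol; rfl
  | succ fuel ih =>
    intro poz sol
    simp only [bcktRec, bcktAltRec]
    refine foldl_ext _ _ ?_ _ _
    intro s i
    rw [consistent_append]
    cases hguard : (match (poz.getLast?).map (pyAt list) with
        | none => true
        | some lv => decide (lv < pyAt list i)) with
    | false => simp
    | true =>
      simp only [if_true, ih, solutionFound_append, solution_eq, sum_append,
        List.getLast?_concat, Option.map_some]

-- ===== VERDICT (by name: the statement is the Claim_ definition above) =====
theorem bckt_spec : Claim_equal_bckt := by
  intro list n _ _
  unfold Spec_bckt bckt bckt_alt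
  have h := rec_eq list n (list.length + 1) [] []
  simpa [solutionFound] using h
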